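-- pv_equiv track=rewrite | github.com/GoWoong/cording_test | Level1/test20.py | solution
-- ===== SOURCE A (Python) =====
-- def solution(price, money, count):
--     answer = 0
--     result = 0
--     for i in range(1,count+1):
--         result += price * i
--     if money < result:
--         answer = result - money
--     return answer
-- ===== SOURCE B (Python) =====
-- def solution(price, money, count):
--     total = price * count * (count + 1) // 2 if count > 0 else 0
--     return max(0, total - money)
-- ===== Notes on version B (the rewrite author's own statement) =====
-- stated objective: faster
-- what changed: Replaced the O(count) accumulation loop by the closed-form arithmetic-series sum price*count*(count+1)//2 and a max with 0.
import Mathlib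
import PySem

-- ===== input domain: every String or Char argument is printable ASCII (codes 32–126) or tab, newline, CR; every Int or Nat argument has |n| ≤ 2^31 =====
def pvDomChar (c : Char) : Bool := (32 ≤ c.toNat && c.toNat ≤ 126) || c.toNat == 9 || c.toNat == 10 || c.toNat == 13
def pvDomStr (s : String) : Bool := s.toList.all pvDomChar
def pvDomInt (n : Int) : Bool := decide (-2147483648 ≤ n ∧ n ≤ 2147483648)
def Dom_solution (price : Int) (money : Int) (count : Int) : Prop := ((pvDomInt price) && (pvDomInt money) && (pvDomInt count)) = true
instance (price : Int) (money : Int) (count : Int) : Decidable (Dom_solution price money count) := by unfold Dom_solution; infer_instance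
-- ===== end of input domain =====

-- ===== PORT A =====
-- B replaces A's O(count) loop by the closed-form arithmetic series (objective: faster).
def solution (price : Int) (money : Int) (count : Int) : Int :=
  let result := (PySem.List.pyRange 1 (count + 1) 1).foldl (fun r i => r + price * i) 0
  if money < result then result - money else 0

-- ===== PORT B =====
def solution_alt (price : Int) (money : Int) (count : Int) : Int :=
  let total := if count > 0 then PySem.Int.floordiv (price * count * (count + 1)) 2 else 0
  max 0 (total - money)

-- ===== PRECONDITION & SPEC =====
def Spec_solution (price : Int) (money : Int) (count : Int) (out : Int) : Prop := out = solution_alt price money count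
instance (price : Int) (money : Int) (count : Int) (out : Int) : Decidable (Spec_solution price money count out) := by unfold Spec_solution; infer_instance

-- ===== CLAIM (what is proved, stated in full; the proofs are below) =====
def Claim_equal_solution : Prop := ∀ (price : Int) (money : Int) (count : Int), Dom_solution price money count → Spec_solution price money count (solution price money count)

-- ===== LEMMAS AND PROOFS =====
theorem pv_foldl_sum (price : Int) : ∀ (n : Nat) (r : Int),
    2 * ((PySem.List.pyRange 1 ((n : Int) + 1) 1).foldl (fun a i => a + price * i) r)
      = 2 * r + price * (n : Int) * ((n : Int) + 1) := by
  intro n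
  induction n with
  | zero => intro r; simp [PySem.List.pyRange_one_eq_nil]
  | succ k ih =>
    intro r
    have h : PySem.List.pyRange 1 ((k : Int) + 1 + 1) 1
        = PySem.List.pyRange 1 ((k : Int) + 1) 1 ++ [(k : Int) + 1] :=
      PySem.List.pyRange_one_succ_right (by omega)
    push_cast
    rw [h, List.foldl_append]
    simp only [List.foldl]
    linear_combination ih r

-- ===== VERDICT (by name: the statement is the Claim_ definition above) =====
theorem solution_spec : Claim_equal_solution := by
  intro price money count _
  unfold Spec_solution solution solution_alt
  by_cases hc : count > 0
  · have hn : ((count.toNat : Int)) = count := Int.toNat_of_nonneg (by omega)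
    have hsum := pv_foldl_sum price count.toNat 0
    rw [hn] at hsum
    set S := (PySem.List.pyRange 1 (count + 1) 1).foldl (fun a i => a + price * i) 0 with hS
    have htot : PySem.Int.floordiv (price * count * (count + 1)) 2 = S := by
      rw [PySem.Int.floordiv_eq_ediv_of_pos (by norm_num)]
      have : price * count * (count + 1) = 2 * S := by rw [hsum]; ring
      rw [this]; exact Int.mul_ediv_cancel_left S (by norm_num)
    rw [if_pos hc, htot]
    dsimp only
    omega
  · have hnil : PySem.List.pyRange 1 (count + 1) 1 = [] :=
      PySem.List.pyRange_one_eq_nil (by omega)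
    simp only [hnil, List.foldl_nil, if_neg hc]
    omega
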